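-- pv_equiv track=rewrite | github.com/megatrommendes/MegaPetz | Model/DAO/FuncoesAuxiliares/FormataCEP.py | formata_cep
-- ===== SOURCE A (Python) =====
-- def formata_cep(text):
--     # Remove caracteres não numéricos
--     text = ''.join(filter(str.isdigit, text))
--
--     if len(text) > 8:
--         # Limita o tamanho do texto
--         text = text[:8]
--
--     formatted_text = ''
--     for i in range(len(text)):
--         if i == 5:
--             formatted_text += '-'
--         formatted_text += text[i]
--     return formatted_text
-- ===== SOURCE B (Python) =====
-- def formata_cep(text):
--     digits = ''.join(filter(str.isdigit, text))[:8]
--     if len(digits) > 5: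
--         return digits[:5] + '-' + digits[5:]
--     return digits
-- ===== Notes on version B (the rewrite author's own statement) =====
-- stated objective: simpler
-- what changed: Replaced A's per-character index loop with a conditional dash insertion at i==5 by a single length-guarded slice concatenation (digits[:5] + '-' + digits[5:]) on the once-cleaned digit string.
import Mathlib
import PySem

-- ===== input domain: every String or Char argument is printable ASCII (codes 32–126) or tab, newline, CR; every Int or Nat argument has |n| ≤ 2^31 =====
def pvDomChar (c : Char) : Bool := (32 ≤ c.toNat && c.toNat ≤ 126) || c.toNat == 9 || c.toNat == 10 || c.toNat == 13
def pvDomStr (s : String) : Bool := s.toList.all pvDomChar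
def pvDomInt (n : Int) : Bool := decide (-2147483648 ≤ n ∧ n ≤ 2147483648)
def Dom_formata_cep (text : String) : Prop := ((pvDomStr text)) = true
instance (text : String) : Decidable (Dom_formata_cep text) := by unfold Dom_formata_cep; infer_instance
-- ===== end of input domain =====

-- B replaces A's per-character loop with a dash insert at index 5 by a single
-- length-guarded slice concatenation on the cleaned digit string (objective: simpler).

-- ===== PORT A =====
-- filter digits; conditional truncation text[:8]; then the index loop appending '-' at i == 5
def formata_cep (text : String) : String :=
  let t0 : List Char := text.toList.filter PySem.Chars.isdigit
  let t : List Char := if t0.length > 8 then PySem.List.slice t0 none (some 8) else t0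
  let formatted : List Char :=
    (PySem.List.pyRange 0 (t.length : Int) 1).foldl
      (fun acc i =>
        let acc := if i == 5 then acc ++ ['-'] else acc
        acc ++ ((PySem.List.pyGet? t i).elim [] (fun c => [c]))) []
  String.ofList formatted

-- ===== PORT B =====
-- digits[:8] once; then digits[:5] + '-' + digits[5:] iff len(digits) > 5
def formata_cep_alt (text : String) : String :=
  let digits : List Char := (text.toList.filter PySem.Chars.isdigit).take 8
  if digits.length > 5 then String.ofList (digits.take 5 ++ '-' :: digits.drop 5)
  else String.ofList digits

-- ===== PRECONDITION & SPEC =====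
def Spec_formata_cep (text : String) (out : String) : Prop := out = formata_cep_alt text
instance (text : String) (out : String) : Decidable (Spec_formata_cep text out) := by unfold Spec_formata_cep; infer_instance

-- ===== CLAIM (what is proved, stated in full; the proofs are below) =====
def Claim_equal_formata_cep : Prop := ∀ (text : String), Dom_formata_cep text → Spec_formata_cep text (formata_cep text)

-- ===== LEMMAS AND PROOFS =====

-- A's dash-at-index-5 loop over any list of at most 8 characters equals B's slice concatenation.
theorem loop_eq_slice (l : List Char) (h : l.length ≤ 8) :
    (PySem.List.pyRange 0 (l.length : Int) 1).foldl
      (fun acc i =>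
        let acc := if i == 5 then acc ++ ['-'] else acc
        acc ++ ((PySem.List.pyGet? l i).elim [] (fun c => [c]))) []
    = if 5 < l.length then l.take 5 ++ '-' :: l.drop 5 else l := by
  match l, h with
  | [], _ => decide
  | [a], _ => simp [PySem.List.pyRange, PySem.List.pyGet?, PySem.List.pyIdx?, List.range_succ]
  | [a,b], _ => simp [PySem.List.pyRange, PySem.List.pyGet?, PySem.List.pyIdx?, List.range_succ]
  | [a,b,c], _ => simp [PySem.List.pyRange, PySem.List.pyGet?, PySem.List.pyIdx?, List.range_succ]
  | [a,b,c,d], _ => simp [PySem.List.pyRange, PySem.List.pyGet?, PySem.List.pyIdx?, List.range_succ]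
  | [a,b,c,d,e], _ => simp [PySem.List.pyRange, PySem.List.pyGet?, PySem.List.pyIdx?, List.range_succ]
  | [a,b,c,d,e,f], _ => simp [PySem.List.pyRange, PySem.List.pyGet?, PySem.List.pyIdx?, List.range_succ]
  | [a,b,c,d,e,f,g], _ => simp [PySem.List.pyRange, PySem.List.pyGet?, PySem.List.pyIdx?, List.range_succ]
  | [a,b,c,d,e,f,g,h'], _ => simp [PySem.List.pyRange, PySem.List.pyGet?, PySem.List.pyIdx?, List.range_succ]

-- A's conditional truncation is exactly take 8
theorem trunc_eq_take (l : List Char) :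
    (if l.length > 8 then PySem.List.slice l none (some 8) else l) = l.take 8 := by
  split_ifs with hl
  · simpa using PySem.List.slice_to_natCast (xs := l) (b := 8)
  · exact (List.take_of_length_le (by omega)).symm

-- ===== VERDICT (by name: the statement is the Claim_ definition above) =====
theorem formata_cep_spec : Claim_equal_formata_cep := by
  intro text _
  unfold Spec_formata_cep formata_cep formata_cep_alt
  dsimp only
  rw [trunc_eq_take, loop_eq_slice _ (by simp)]
  split_ifs with h1 <;> rfl
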